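-- pv_equiv track=rewrite | github.com/christian-byrne/fresh-os | automation-scripts/p/format-notes.py | nxt_chunk
-- ===== SOURCE A (Python) =====
-- def nxt_chunk(lines, chunk_num):
--     i = start = 0
--     count = 0
--     while count <= int(chunk_num) and i < len(lines):
--         if "##1" in lines[i]:
--             count += 1
--         i += 1
--         if count <= int(chunk_num) - 1:
--             start += 1
--     return lines[start+1:i]
-- ===== SOURCE B (Python) =====
-- def nxt_chunk(lines, chunk_num):
--     cn = int(chunk_num)
--     if cn < 0:
--         return []
--     markers = [i for i, line in enumerate(lines) if "##1" in line]
--     if cn >= 1 and len(markers) < cn: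
--         return []
--     prev = markers[cn - 1] if cn >= 1 else 0
--     end = markers[cn] + 1 if len(markers) > cn else len(lines)
--     return lines[prev + 1:end]
-- ===== Notes on version B (the rewrite author's own statement) =====
-- stated objective: simpler
-- what changed: Replaced the dual running counters (i/start/count) while-loop by one pass that collects the marker line indices and then computes the slice bounds arithmetically from that list.
import Mathlib
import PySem

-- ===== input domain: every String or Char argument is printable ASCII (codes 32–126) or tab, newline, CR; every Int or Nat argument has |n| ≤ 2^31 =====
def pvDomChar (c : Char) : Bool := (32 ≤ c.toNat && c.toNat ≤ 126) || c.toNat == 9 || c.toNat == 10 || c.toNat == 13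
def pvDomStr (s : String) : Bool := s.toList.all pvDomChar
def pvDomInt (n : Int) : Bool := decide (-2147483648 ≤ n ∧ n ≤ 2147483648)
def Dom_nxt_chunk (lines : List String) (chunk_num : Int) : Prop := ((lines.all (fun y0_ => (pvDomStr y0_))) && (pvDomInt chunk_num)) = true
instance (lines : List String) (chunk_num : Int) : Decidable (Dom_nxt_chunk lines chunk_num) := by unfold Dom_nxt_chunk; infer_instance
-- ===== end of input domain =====

-- B replaces A's while-loop with its three running counters by a marker-index scan plus
-- arithmetic slice bounds; equivalent on all inputs, similar cost (objective: simpler).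

-- ===== PORT A =====
-- the while-loop of A: state (i, start, count); returns the final (start, i)
def nxtA_loop (lines : List String) (cn : Int) (i start : Nat) (count : Int) : Nat × Nat :=
  if h : count ≤ cn ∧ i < lines.length then
    let count' := if PySem.Str.isIn "##1" (lines[i]'h.2) then count + 1 else count
    let start' := if count' ≤ cn - 1 then start + 1 else start
    nxtA_loop lines cn (i + 1) start' count'
  else (start, i)
termination_by lines.length - i
decreasing_by omega

def nxt_chunk (lines : List String) (chunk_num : Int) : List String :=
  let r := nxtA_loop lines chunk_num 0 0 0
  PySem.List.slice lines (some ((r.1 : Int) + 1)) (some (r.2 : Int))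

-- ===== PORT B =====
def nxt_chunk_alt (lines : List String) (chunk_num : Int) : List String :=
  let cn := chunk_num
  if cn < 0 then []
  else
    let markers := ((PySem.List.enumerate lines 0).filter (fun p => PySem.Str.isIn "##1" p.2)).map (fun p => p.1)
    if 1 ≤ cn ∧ (markers.length : Int) < cn then []
    else
      -- markers[cn-1] / markers[cn]: in range thanks to the guards above (default never used)
      let prev : Int := if 1 ≤ cn then PySem.List.pyGetD markers (cn - 1) 0 else 0
      let e : Int := if cn < (markers.length : Int) then PySem.List.pyGetD markers cn 0 + 1 else (lines.length : Int)
      PySem.List.slice lines (some (prev + 1)) (some e)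

-- ===== PRECONDITION & SPEC =====
def Spec_nxt_chunk (lines : List String) (chunk_num : Int) (out : List String) : Prop := out = nxt_chunk_alt lines chunk_num
instance (lines : List String) (chunk_num : Int) (out : List String) : Decidable (Spec_nxt_chunk lines chunk_num out) := by unfold Spec_nxt_chunk; infer_instance

-- ===== CLAIM (what is proved, stated in full; the proofs are below) =====
def Claim_equal_nxt_chunk : Prop := ∀ (lines : List String) (chunk_num : Int), Dom_nxt_chunk lines chunk_num → Spec_nxt_chunk lines chunk_num (nxt_chunk lines chunk_num)

-- ===== LEMMAS AND PROOFS =====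

-- a line contains the marker
def pvMark (s : String) : Bool := PySem.Str.isIn "##1" s

-- indices (offset by j) of the marker lines
def pvMks : List String → Nat → List Nat
  | [], _ => []
  | l :: ls, j => (if pvMark l then [j] else []) ++ pvMks ls (j + 1)

-- number of marker lines among the first b lines
def pvM (lines : List String) (b : Nat) : Nat := (lines.take b).countP pvMark

-- end index of A's loop: one past the (cn+1)-th marker, else len
def pvEtgt (lines : List String) (k : Nat) : Nat :=
  if h : k < (pvMks lines 0).length then (pvMks lines 0)[k] + 1 else lines.length

-- A's final start when ≥ cn markers exist
def pvPrevIdx (lines : List String) (k : Nat) : Nat :=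
  if k = 0 then 0
  else if h : k - 1 < (pvMks lines 0).length then (pvMks lines 0)[k - 1] else lines.length

-- A's final start
def pvSfin (lines : List String) (k : Nat) : Nat :=
  if lines.countP pvMark < k then lines.length else pvPrevIdx lines k

theorem pvMks_cons_pos (l : String) (ls : List String) (j : Nat) (hm : pvMark l = true) :
    pvMks (l :: ls) j = j :: pvMks ls (j + 1) := by simp [pvMks, hm]

theorem pvMks_cons_neg (l : String) (ls : List String) (j : Nat) (hm : pvMark l = false) :
    pvMks (l :: ls) j = pvMks ls (j + 1) := by simp [pvMks, hm]

theorem pvMks_length (lines : List String) : ∀ j, (pvMks lines j).length = lines.countP pvMark := by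
  induction lines with
  | nil => intro j; simp [pvMks]
  | cons l ls ih =>
    intro j
    by_cases h : pvMark l
    · rw [pvMks_cons_pos l ls j h]
      simp [h, ih]
    · rw [pvMks_cons_neg l ls j (by simpa using h)]
      simp [h, ih]

theorem pvMks_lb (lines : List String) : ∀ j x, x ∈ pvMks lines j → j ≤ x := by
  induction lines with
  | nil => intro j x hx; simp [pvMks] at hx
  | cons l ls ih =>
    intro j x hx
    by_cases h : pvMark l
    · rw [pvMks_cons_pos l ls j h] at hx
      rcases List.mem_cons.mp hx with rfl | hx'
      · exact le_refl x
      · exact le_trans (Nat.le_succ j) (ih (j + 1) x hx')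
    · rw [pvMks_cons_neg l ls j (by simpa using h)] at hx
      exact le_trans (Nat.le_succ j) (ih (j + 1) x hx)

theorem pvMks_lt_iff (lines : List String) :
    ∀ j b t (h : t < (pvMks lines j).length),
      ((pvMks lines j)[t] < j + b ↔ t < (lines.take b).countP pvMark) := by
  induction lines with
  | nil => intro j b t h; simp [pvMks] at h
  | cons l ls ih =>
    intro j b t h
    by_cases hm : pvMark l
    · rw [pvMks_cons_pos l ls j hm] at h
      simp only [pvMks_cons_pos l ls j hm]
      match t with
      | 0 =>
        simp only [List.getElem_cons_zero]
        cases b with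
        | zero => simp
        | succ b' =>
          rw [List.take_succ_cons]
          simp [hm]
      | t + 1 =>
        simp only [List.getElem_cons_succ]
        simp only [List.length_cons] at h
        have ht : t < (pvMks ls (j + 1)).length := by omega
        cases b with
        | zero =>
          simp only [List.take_zero, List.countP_nil]
          have hlb := pvMks_lb ls (j + 1) _ (List.getElem_mem ht)
          omega
        | succ b' =>
          have hih := ih (j + 1) b' t ht
          rw [List.take_succ_cons]
          simp only [List.countP_cons, hm, if_pos]
          constructor
          · intro hlt
            have : (pvMks ls (j + 1))[t] < j + 1 + b' := by omega
            have := hih.mp this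
            omega
          · intro hlt
            have : t < (ls.take b').countP pvMark := by omega
            have := hih.mpr this
            omega
    · have hm' : pvMark l = false := by simpa using hm
      rw [pvMks_cons_neg l ls j hm'] at h
      simp only [pvMks_cons_neg l ls j hm']
      cases b with
      | zero =>
        simp only [List.take_zero, List.countP_nil]
        have hlb := pvMks_lb ls (j + 1) _ (List.getElem_mem h)
        omega
      | succ b' =>
        have hih := ih (j + 1) b' t h
        rw [List.take_succ_cons]
        simp only [List.countP_cons, hm']
        constructor
        · intro hlt
          have : (pvMks ls (j + 1))[t] < j + 1 + b' := by omega
          have := hih.mp this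
          simp only [Bool.false_eq_true, if_false]
          omega
        · intro hlt
          simp only [Bool.false_eq_true, if_false] at hlt
          have : t < (ls.take b').countP pvMark := by omega
          have := hih.mpr this
          omega

-- specialization at j = 0
theorem pvMks_lt_iff0 (lines : List String) (b t : Nat) (h : t < (pvMks lines 0).length) :
    (pvMks lines 0)[t] < b ↔ t < pvM lines b := by
  have := pvMks_lt_iff lines 0 b t h
  simpa [pvM] using this

theorem pvM_succ (lines : List String) (i : Nat) (h : i < lines.length) :
    pvM lines (i + 1) = pvM lines i + (if pvMark lines[i] then 1 else 0) := by
  unfold pvM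
  rw [List.take_add_one, List.getElem?_eq_getElem h, List.countP_append]
  simp [List.countP_cons]

theorem pvM_len (lines : List String) : pvM lines lines.length = lines.countP pvMark := by
  simp [pvM]

theorem pvM_le_total (lines : List String) (b : Nat) : pvM lines b ≤ lines.countP pvMark := by
  unfold pvM
  exact (List.take_sublist _ _).countP_le

theorem pvEtgt_le (lines : List String) (k : Nat) : pvEtgt lines k ≤ lines.length := by
  unfold pvEtgt
  split
  · next h =>
    have h2 := (pvMks_lt_iff0 lines lines.length k h).mpr
      (by rw [pvM_len, ← pvMks_length lines 0]; exact h)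
    omega
  · exact le_refl _

-- at a marker line i, the (pvM lines i)-th recorded marker index is exactly i
theorem pvMks_hit (lines : List String) (i : Nat) (hi : i < lines.length)
    (hm : pvMark lines[i] = true) :
    pvM lines i < (pvMks lines 0).length ∧ (pvMks lines 0)[pvM lines i]? = some i := by
  have hlt : pvM lines i < (pvMks lines 0).length := by
    rw [pvMks_length]
    calc pvM lines i < pvM lines (i + 1) := by rw [pvM_succ lines i hi]; simp [hm]
      _ ≤ lines.countP pvMark := pvM_le_total lines (i + 1)
  refine ⟨hlt, ?_⟩
  rw [List.getElem?_eq_getElem hlt]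
  have h1 : ¬ (pvMks lines 0)[pvM lines i] < i := by
    rw [pvMks_lt_iff0 lines i _ hlt]; omega
  have h2 : (pvMks lines 0)[pvM lines i] < i + 1 := by
    rw [pvMks_lt_iff0 lines (i + 1) _ hlt, pvM_succ lines i hi]; simp [hm]
  exact congrArg some (by omega)

-- exit characterization of A's loop
theorem pv_exit (lines : List String) (cn : Int) (k : Nat) (hk : cn = (k : Int))
    (i start : Nat) (count : Int)
    (hstop : ¬ (count ≤ cn ∧ i < lines.length))
    (hc : count = (pvM lines i : Int))
    (hi : i ≤ pvEtgt lines k)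
    (hs : start = if count ≤ cn - 1 then i else pvPrevIdx lines k) :
    (start, i) = (pvSfin lines k, pvEtgt lines k) := by
  rcases Classical.em (count ≤ cn) with hcle | hcgt
  · -- then ¬ i < len, so i = len
    have hilen : ¬ i < lines.length := fun h => hstop ⟨hcle, h⟩
    have hE := pvEtgt_le lines k
    have hieq : i = lines.length := by omega
    have hEeq : pvEtgt lines k = lines.length := by omega
    subst hieq
    rw [hEeq]
    have htot : count = (lines.countP pvMark : Int) := by rw [hc, pvM_len]
    unfold pvSfin
    by_cases hlt : lines.countP pvMark < k
    · have : count ≤ cn - 1 := by omega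
      rw [hs, if_pos this, if_pos hlt]
    · have : ¬ count ≤ cn - 1 := by omega
      rw [hs, if_neg this, if_neg hlt]
  · -- count > cn: loop passed the (k+1)-th marker; i = Etgt
    have hMi : k + 1 ≤ pvM lines i := by omega
    have hitot : pvM lines i ≤ lines.countP pvMark := pvM_le_total lines i
    have hktot : k < (pvMks lines 0).length := by rw [pvMks_length]; omega
    have hmk : (pvMks lines 0)[k] < i := by
      rw [pvMks_lt_iff0 lines i k hktot]; omega
    have hEeq : pvEtgt lines k = (pvMks lines 0)[k] + 1 := by
      unfold pvEtgt; rw [dif_pos hktot]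
    have hieq : i = pvEtgt lines k := by omega
    have hs' : start = pvPrevIdx lines k := by
      rw [hs, if_neg (by omega)]
    rw [hieq, hs']
    unfold pvSfin
    rw [if_neg (by rw [pvMks_length] at hktot; omega)]

-- main invariant lemma for A's loop
theorem pv_loop_char (lines : List String) (cn : Int) (k : Nat) (hk : cn = (k : Int)) :
    ∀ (n i start : Nat) (count : Int), lines.length - i = n →
      count = (pvM lines i : Int) → i ≤ pvEtgt lines k →
      start = (if count ≤ cn - 1 then i else pvPrevIdx lines k) →
      nxtA_loop lines cn i start count = (pvSfin lines k, pvEtgt lines k) := by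
  intro n
  induction n with
  | zero =>
    intro i start count hn hc hi hs
    rw [nxtA_loop]
    rw [dif_neg (by omega)]
    exact pv_exit lines cn k hk i start count (by omega) hc hi hs
  | succ n ih =>
    intro i start count hn hc hi hs
    rw [nxtA_loop]
    by_cases hcond : count ≤ cn ∧ i < lines.length
    · rw [dif_pos hcond]
      obtain ⟨hcle, hilen⟩ := hcond
      set count' : Int := (if PySem.Str.isIn "##1" (lines[i]'hilen) then count + 1 else count) with hcdef
      have hbit : count' = count ∨ count' = count + 1 := by
        rw [hcdef]; split <;> simp
      have hc' : count' = (pvM lines (i + 1) : Int) := by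
        have hmm : PySem.Str.isIn "##1" lines[i] = pvMark lines[i] := rfl
        rw [hcdef, pvM_succ lines i hilen, hc, hmm]
        by_cases hm : pvMark lines[i] = true
        · rw [if_pos hm, if_pos hm]; push_cast; ring
        · rw [if_neg hm, if_neg hm]; push_cast; ring
      have hi' : i + 1 ≤ pvEtgt lines k := by
        by_cases hktot : k < (pvMks lines 0).length
        · have hEeq : pvEtgt lines k = (pvMks lines 0)[k] + 1 := by
            unfold pvEtgt; rw [dif_pos hktot]
          have : ¬ (pvMks lines 0)[k] < i := by
            rw [pvMks_lt_iff0 lines i k hktot]; omega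
          omega
        · have hEeq : pvEtgt lines k = lines.length := by
            unfold pvEtgt; rw [dif_neg hktot]
          omega
      have hs'' : (if count' ≤ cn - 1 then start + 1 else start)
          = (if count' ≤ cn - 1 then i + 1 else pvPrevIdx lines k) := by
        by_cases hnew : count' ≤ cn - 1
        · rw [if_pos hnew, if_pos hnew, hs, if_pos (by omega)]
        · rw [if_neg hnew, if_neg hnew]
          by_cases hold : count ≤ cn - 1
          · -- count jumps from cn-1 to cn at this marker line
            have hbite : count' = count + 1 := by omega
            have hme : pvMark lines[i] = true := by
              by_contra hmm
              have hcond : ¬ (PySem.Str.isIn "##1" lines[i] = true) := hmm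
              rw [hcdef, if_neg hcond] at hbite
              omega
            have hMi : pvM lines i = k - 1 := by omega
            have hk1 : 1 ≤ k := by
              have h0 : (0 : Int) ≤ count := by rw [hc]; positivity
              omega
            obtain ⟨hlt, heq⟩ := pvMks_hit lines i hilen hme
            rw [hs, if_pos hold]
            unfold pvPrevIdx
            rw [if_neg (by omega), dif_pos (by omega)]
            have heq2 : (pvMks lines 0)[k - 1]? = some i := by rw [← hMi]; exact heq
            rw [List.getElem?_eq_getElem (by omega)] at heq2
            exact (Option.some_injective _ heq2).symm
          · rw [hs, if_neg hold]
      exact ih (i + 1) (if count' ≤ cn - 1 then start + 1 else start) count'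
        (by omega) hc' hi' hs''
    · rw [dif_neg hcond]
      exact pv_exit lines cn k hk i start count hcond hc hi hs

-- the loop from the initial state
theorem pv_loop_init (lines : List String) (cn : Int) (k : Nat) (hk : cn = (k : Int)) :
    nxtA_loop lines cn 0 0 0 = (pvSfin lines k, pvEtgt lines k) := by
  apply pv_loop_char lines cn k hk (lines.length - 0) 0 0 0 rfl (by simp [pvM])
  · exact Nat.zero_le _
  · by_cases h : (0 : Int) ≤ cn - 1
    · rw [if_pos h]
    · rw [if_neg h]
      unfold pvPrevIdx
      rw [if_pos (by omega)]

-- the port-B marker list is pvMks cast to Int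
theorem pv_markers_eq (lines : List String) :
    ∀ (j : Nat), ((PySem.List.enumerate lines (j : Int)).filter (fun p => PySem.Str.isIn "##1" p.2)).map (fun p => p.1)
      = (pvMks lines j).map (fun (n : Nat) => (n : Int)) := by
  induction lines with
  | nil => intro j; simp [pvMks, PySem.List.enumerate_nil]
  | cons l ls ih =>
    intro j
    rw [PySem.List.enumerate_cons]
    have hj : ((j : Int) + 1) = (((j + 1 : Nat)) : Int) := by push_cast; ring
    rw [hj]
    simp only [List.filter_cons]
    by_cases hm' : PySem.Str.isIn "##1" l = true
    · rw [if_pos hm', List.map_cons, pvMks_cons_pos l ls j hm', List.map_cons, ih (j + 1)]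
    · rw [if_neg hm', pvMks_cons_neg l ls j (by simpa [pvMark] using hm'), ih (j + 1)]

-- A = B for cn ≥ 0
theorem pv_main_nonneg (lines : List String) (cn : Int) (k : Nat) (hk : cn = (k : Int)) :
    nxt_chunk lines cn = nxt_chunk_alt lines cn := by
  unfold nxt_chunk nxt_chunk_alt
  rw [pv_loop_init lines cn k hk]
  have hmeq := pv_markers_eq lines 0
  rw [Nat.cast_zero] at hmeq
  rw [if_neg (by omega : ¬ cn < 0)]
  simp only [hmeq, List.length_map]
  set mks := pvMks lines 0 with hmks
  have hlenmks : mks.length = lines.countP pvMark := pvMks_length lines 0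
  by_cases hguard : 1 ≤ cn ∧ (mks.length : Int) < cn
  · -- fewer than cn markers: both empty
    rw [if_pos hguard]
    have hS : pvSfin lines k = lines.length := by
      unfold pvSfin; rw [if_pos (by omega)]
    have hE := pvEtgt_le lines k
    rw [hS]
    have h1 : ((lines.length : Int) + 1) = ((lines.length + 1 : Nat) : Int) := by push_cast; ring
    rw [h1, PySem.List.slice_natCast]
    simp
  · rw [if_neg hguard]
    have htotk : k ≤ mks.length ∨ k = 0 := by omega
    -- prev + 1 = Sfin + 1
    have hSfin : pvSfin lines k = pvPrevIdx lines k := by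
      unfold pvSfin; rw [if_neg (by omega)]
    have hprev : (if 1 ≤ cn then PySem.List.pyGetD (mks.map (fun (n : Nat) => (n : Int))) (cn - 1) 0 else 0)
        = (pvPrevIdx lines k : Int) := by
      by_cases hk1 : 1 ≤ cn
      · rw [if_pos hk1]
        have hklt : k - 1 < mks.length := by omega
        have hcast : cn - 1 = ((k - 1 : Nat) : Int) := by omega
        rw [hcast, PySem.List.pyGetD_natCast]
        rw [List.getD_eq_getElem _ _ (by simpa using hklt)]
        rw [List.getElem_map]
        unfold pvPrevIdx
        rw [if_neg (by omega), dif_pos hklt]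
      · rw [if_neg hk1]
        unfold pvPrevIdx
        rw [if_pos (by omega)]
        simp
    have hend : (if cn < ((mks.length : Int)) then PySem.List.pyGetD (mks.map (fun (n : Nat) => (n : Int))) cn 0 + 1 else (lines.length : Int))
        = (pvEtgt lines k : Int) := by
      by_cases hke : k < mks.length
      · rw [if_pos (by omega)]
        rw [hk, PySem.List.pyGetD_natCast]
        rw [List.getD_eq_getElem _ _ (by simpa using hke)]
        rw [List.getElem_map]
        unfold pvEtgt
        rw [dif_pos hke]
        push_cast; ring
      · rw [if_neg (by omega)]
        unfold pvEtgt
        rw [dif_neg hke]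
    rw [hprev, hend, hSfin]

-- ===== VERDICT (by name: the statement is the Claim_ definition above) =====
theorem nxt_chunk_spec : Claim_equal_nxt_chunk := by
  intro lines chunk_num _
  unfold Spec_nxt_chunk
  by_cases hneg : chunk_num < 0
  · -- loop exits immediately; both return []
    unfold nxt_chunk nxt_chunk_alt
    rw [nxtA_loop, dif_neg (by omega)]
    rw [if_pos hneg]
    simp [PySem.List.slice]
  · obtain ⟨k, hk⟩ : ∃ k : Nat, chunk_num = (k : Int) :=
      ⟨chunk_num.toNat, by omega⟩
    exact pv_main_nonneg lines chunk_num k hk
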